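-- pv_equiv track=rewrite | github.com/sarishtshreshth0/plag_extract | Project_CodeNet_Python800/p03104/s353375295.py | f
-- ===== SOURCE A (Python) =====
-- def f(x):
--     cou = 0
--     re = 0
--     while True:
--         if x < 2**cou:
--             break
--         if cou == 0:
--             if 1 <= x % 4 <= 2:
--                 re += 1
--         else:
--             p = x % (2**(cou+1))
--             if 2**cou <= p and p % 2 == 0:
--                 re += 2**cou
--         cou += 1
--     return re
-- ===== SOURCE B (Python) =====
-- def f(x):
--     # closed form: 0 for x < 1; else by x % 4: 0 -> x, 1 -> 1, 2 -> x+1, 3 -> 0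
--     if x < 1:
--         return 0
--     r = x % 4
--     if r == 0:
--         return x
--     if r == 1:
--         return 1
--     if r == 2:
--         return x + 1
--     return 0
-- ===== Notes on version B (the rewrite author's own statement) =====
-- stated objective: simpler
-- what changed: Replaced the bit-by-bit while-loop accumulation with a direct four-way closed form determined by x mod 4 (with an early return for non-positive x), eliminating the loop entirely.
import Mathlib
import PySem

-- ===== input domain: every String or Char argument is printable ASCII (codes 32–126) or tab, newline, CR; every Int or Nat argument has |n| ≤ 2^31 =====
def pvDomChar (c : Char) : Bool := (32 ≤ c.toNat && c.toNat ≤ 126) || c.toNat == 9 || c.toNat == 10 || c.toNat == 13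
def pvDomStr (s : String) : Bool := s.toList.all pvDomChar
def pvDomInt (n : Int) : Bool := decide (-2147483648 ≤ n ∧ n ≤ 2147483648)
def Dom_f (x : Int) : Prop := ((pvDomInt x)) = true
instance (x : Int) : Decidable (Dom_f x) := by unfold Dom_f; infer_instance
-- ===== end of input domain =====

-- B replaces A's bit-accumulation loop with a closed form on x % 4 (objective: simpler).

-- ===== PORT A =====
-- A's while-True loop, state (cou, re); the loop breaks when x < 2^cou.
-- every modulus A takes has a positive divisor, so Lean's Int % equals Python's % here.
def fLoop (x : Int) (cou : Nat) (re : Int) : Int :=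
  if x < 2 ^ cou then re
  else
    fLoop x (cou + 1)
      (if cou = 0 then
        (if 1 ≤ x % 4 ∧ x % 4 ≤ 2 then re + 1 else re)
      else
        (if 2 ^ cou ≤ x % 2 ^ (cou + 1) ∧ x % 2 ^ (cou + 1) % 2 = 0 then re + 2 ^ cou else re))
termination_by (x + 1 - 2 ^ cou).toNat
decreasing_by
  have h1 : (0 : Int) < 2 ^ cou := pow_pos (by norm_num) cou
  omega

def f (x : Int) : Int := fLoop x 0 0

-- ===== PORT B =====
def f_alt (x : Int) : Int :=
  if x < 1 then 0
  else
    let r := x % 4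
    if r = 0 then x
    else if r = 1 then 1
    else if r = 2 then x + 1
    else 0

-- ===== PRECONDITION & SPEC =====
def Spec_f (x : Int) (out : Int) : Prop := out = f_alt x
instance (x : Int) (out : Int) : Decidable (Spec_f x out) := by unfold Spec_f; infer_instance

-- ===== CLAIM (what is proved, stated in full; the proofs are below) =====
def Claim_equal_f : Prop := ∀ (x : Int), Dom_f x → Spec_f x (f x)

-- ===== LEMMAS AND PROOFS =====

-- for odd x, once cou ≥ 1 the "p % 2 == 0" test never fires, so the loop adds nothing
theorem fLoop_odd (x : Int) (cou : Nat) (re : Int) (hx : x % 2 = 1) (hc : 1 ≤ cou) :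
    fLoop x cou re = re := by
  fun_induction fLoop x cou re with
  | case1 cou re hbreak => rfl
  | case2 cou re hbreak ih =>
    have hcne : ¬ cou = 0 := by omega
    have hcond : ¬ (2 ^ cou ≤ x % 2 ^ (cou + 1) ∧ (2:Int) ∣ x) := by
      rintro ⟨-, h0⟩; omega
    simp [hcne, hcond] at ih ⊢
    exact ih

-- for even x ≥ 0 and cou ≥ 1, the loop adds exactly the bits of x at positions ≥ cou
theorem fLoop_even (x : Int) (cou : Nat) (re : Int) (hx0 : 0 ≤ x) (hx : x % 2 = 0)
    (hc : 1 ≤ cou) : fLoop x cou re = re + x - x % 2 ^ cou := by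
  fun_induction fLoop x cou re with
  | case1 cou re hbreak =>
    have : x % 2 ^ cou = x := Int.emod_eq_of_lt hx0 (by omega)
    omega
  | case2 cou re hbreak ih =>
    have hcne : ¬ cou = 0 := by omega
    have hpos : (0 : Int) < 2 ^ cou := pow_pos (by norm_num) cou
    have hdvd2 : (2 : Int) ∣ x := by omega
    have hdvd : (2 : Int) ^ cou ∣ 2 ^ (cou + 1) := pow_dvd_pow 2 (by omega)
    have hqq : x % 2 ^ (cou + 1) % 2 ^ cou = x % 2 ^ cou := Int.emod_emod_of_dvd x hdvd
    have hq0 : 0 ≤ x % 2 ^ (cou + 1) := Int.emod_nonneg x (by positivity)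
    have hqlt : x % 2 ^ (cou + 1) < 2 ^ (cou + 1) := Int.emod_lt_of_pos x (by positivity)
    have h2 : (2 : Int) ^ (cou + 1) = 2 ^ cou * 2 := pow_succ 2 cou
    simp [hcne, hdvd2] at ih ⊢
    by_cases hle : 2 ^ cou ≤ x % 2 ^ (cou + 1)
    · have hhi : x % 2 ^ (cou + 1) % 2 ^ cou = x % 2 ^ (cou + 1) - 2 ^ cou := by
        rw [← Int.sub_emod_right (x % 2 ^ (cou + 1)) (2 ^ cou)]
        exact Int.emod_eq_of_lt (by omega) (by omega)
      rw [if_pos hle] at ih ⊢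
      rw [ih]
      omega
    · have hhi : x % 2 ^ (cou + 1) % 2 ^ cou = x % 2 ^ (cou + 1) :=
        Int.emod_eq_of_lt hq0 (by omega)
      rw [if_neg hle] at ih ⊢
      rw [ih]
      omega

-- ===== VERDICT (by name: the statement is the Claim_ definition above) =====
theorem f_spec : Claim_equal_f := by
  intro x _
  unfold Spec_f f f_alt
  by_cases hx1 : x < 1
  · rw [fLoop]
    simp [hx1]
  · rw [fLoop]
    have h1 : ¬ x < 2 ^ 0 := by simpa using hx1
    simp only [h1, if_false, if_neg hx1]
  -- after the first iteration re = [x % 4 ∈ {1,2}], cou = 1; then split on parity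
    by_cases hpar : x % 2 = 1
    · rw [fLoop_odd x 1 _ hpar (by omega)]
      split_ifs <;> omega
    · have hpar' : x % 2 = 0 := by omega
      rw [fLoop_even x 1 _ (by omega) hpar' (by omega)]
      have h21 : (2 : Int) ^ 1 = 2 := by norm_num
      rw [h21]
      split_ifs <;> omega
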